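-- pv_equiv track=rewrite | github.com/Derexas/Euler | euler73.py | divisorsinl
-- ===== SOURCE A (Python) =====
-- def divisorsinl(m, l):
--     d = [set() for _ in range(m)]
--     for i in l:
--         j = 2*i
--         while j < m:
--             d[j].add(i)
--             j = j+i
--     return d
-- ===== SOURCE B (Python) =====
-- def divisorsinl(m, l):
--     # Per-index trial division instead of A's per-element multiple-marking sieve.
--     return [{i for i in l if i > 0 and j % i == 0 and j // i >= 2} for j in range(m)]
-- ===== Notes on version B (the rewrite author's own statement) =====
-- stated objective: simpler
-- what changed: Replaced A's stateful multiple-marking sieve (for each element, walk its multiples and mutate the indexed set) with a one-line per-index trial-division comprehension over l.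
import Mathlib
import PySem

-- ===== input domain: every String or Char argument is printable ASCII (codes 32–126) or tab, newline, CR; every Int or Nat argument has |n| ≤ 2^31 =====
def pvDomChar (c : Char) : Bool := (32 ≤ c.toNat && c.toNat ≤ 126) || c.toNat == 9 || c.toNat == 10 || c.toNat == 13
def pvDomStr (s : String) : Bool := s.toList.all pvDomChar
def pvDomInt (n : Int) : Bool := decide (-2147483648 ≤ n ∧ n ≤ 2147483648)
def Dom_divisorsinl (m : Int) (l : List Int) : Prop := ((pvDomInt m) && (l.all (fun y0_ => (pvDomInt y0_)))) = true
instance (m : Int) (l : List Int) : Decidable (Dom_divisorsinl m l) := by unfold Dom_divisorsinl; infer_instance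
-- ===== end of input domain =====

-- B replaces A's stateful multiple-marking sieve by a per-index trial-division comprehension (simpler).

-- ===== PORT A =====
-- inner 'while j < m: d[j].add(i); j = j+i' loop; the '0 < i' branch is only a totality
-- guard: with i ≤ 0 the Python loop never terminates normally (it diverges or raises
-- IndexError), and Pre_ excludes those inputs.
def pvALoop (m i j : Int) (d : List (List Int)) : List (List Int) :=
  if j < m then
    if _h : 0 < i then
      pvALoop m i (j + i) (PySem.List.pySetD d j (PySem.Set.add (PySem.List.pyGetD d j []) i))
    else d
  else d
termination_by (m - j).toNat
decreasing_by omega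

def divisorsinl (m : Int) (l : List Int) : List (List Int) :=
  l.foldl (fun d i => pvALoop m i (2 * i) d)
    ((PySem.List.pyRange 0 m 1).map (fun _ => ([] : List Int)))

-- ===== PORT B =====
def divisorsinl_alt (m : Int) (l : List Int) : List (List Int) :=
  (PySem.List.pyRange 0 m 1).map (fun j =>
    PySem.Set.ofList (l.filter (fun i =>
      decide (0 < i) && (PySem.Int.mod j i == 0) && decide (2 ≤ PySem.Int.floordiv j i))))

-- ===== PRECONDITION & SPEC =====
-- Pre_ excludes exactly the inputs on which A never returns: an element i ≤ 0 whose loop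
-- is entered (2*i < m) makes A diverge (i = 0) or hit an IndexError via negative indexing.
def Pre_divisorsinl (m : Int) (l : List Int) : Prop := ∀ i ∈ l, 0 < i ∨ m ≤ 2 * i
instance (m : Int) (l : List Int) : Decidable (Pre_divisorsinl m l) := by
  unfold Pre_divisorsinl; infer_instance

def pvWitness_divisorsinl : Int × List Int := (10, [2, 3, 2])

def Spec_divisorsinl (m : Int) (l : List Int) (out : List (List Int)) : Prop := out = divisorsinl_alt m l
instance (m : Int) (l : List Int) (out : List (List Int)) : Decidable (Spec_divisorsinl m l out) := by unfold Spec_divisorsinl; infer_instance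

-- ===== CLAIM (what is proved, stated in full; the proofs are below) =====
def Claim_equal_divisorsinl : Prop := ∀ (m : Int) (l : List Int), Dom_divisorsinl m l → Pre_divisorsinl m l → Spec_divisorsinl m l (divisorsinl m l)

-- ===== LEMMAS AND PROOFS =====

theorem pvALoop_length (m i j : Int) (d : List (List Int)) :
    (pvALoop m i j d).length = d.length := by
  induction j, d using pvALoop.induct m i with
  | case1 j d hj hi ih =>
      rw [pvALoop]; simp only [hj, hi, if_true, dif_pos]
      rw [ih, PySem.List.length_pySetD]
  | case2 j d hj hi => rw [pvALoop]; simp [hj, hi]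
  | case3 j d hj => rw [pvALoop]; simp [hj]

theorem pvALoop_getD (m i j : Int) (d : List (List Int)) :
    0 < i → 0 ≤ j → d.length = m.toNat → ∀ k : Nat, k < d.length →
    (pvALoop m i j d).getD k [] =
      if j ≤ (k : Int) ∧ i ∣ ((k : Int) - j) then PySem.Set.add (d.getD k []) i
      else d.getD k [] := by
  induction j, d using pvALoop.induct m i with
  | case1 j d hj hi ih =>
      intro _ hj0 hm k hk
      have hjlen : j.toNat < d.length := by omega
      rw [pvALoop]; simp only [hj, hi, if_true, dif_pos]
      have hset : PySem.List.pySetD d j (PySem.Set.add (PySem.List.pyGetD d j []) i)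
          = d.set j.toNat (PySem.Set.add (PySem.List.pyGetD d j []) i) :=
        PySem.List.pySetD_of_nonneg d _ hj0
      have hlen' : (PySem.List.pySetD d j (PySem.Set.add (PySem.List.pyGetD d j []) i)).length
          = d.length := PySem.List.length_pySetD d j _
      rw [ih hi (by omega) (by rw [hlen']; exact hm) k (by rw [hlen']; exact hk)]
      have hgetj : PySem.List.pyGetD d j ([] : List Int) = d.getD j.toNat [] := by
        rw [PySem.List.pyGetD_eq_getElem d [] hj0 (by omega)]
        exact (List.getD_eq_getElem d [] hjlen).symm
      by_cases hkj : k = j.toNat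
      · have h1 : ¬ (j + i ≤ (k : Int)) := by omega
        have h2 : j ≤ (k : Int) ∧ i ∣ ((k : Int) - j) := by
          refine ⟨by omega, ?_⟩
          have hz : (k : Int) - j = 0 := by omega
          simp [hz]
        rw [if_neg (by rw [not_and_or]; exact Or.inl h1), if_pos h2]
        rw [hset]
        rw [List.getD_eq_getElem _ _ (by rw [List.length_set]; exact hk)]
        rw [List.getD_eq_getElem _ _ hk]
        have hkk : k = j.toNat := hkj
        subst hkk
        rw [List.getElem_set_self]
        rw [hgetj, List.getD_eq_getElem _ _ hjlen]
      · have hsame : (d.set j.toNat (PySem.Set.add (PySem.List.pyGetD d j []) i)).getD k []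
            = d.getD k [] := by
          rw [List.getD_eq_getElem _ _ (by rw [List.length_set]; exact hk),
              List.getD_eq_getElem _ _ hk]
          exact List.getElem_set_ne (show j.toNat ≠ k by omega) (by rw [List.length_set]; exact hk)
        rw [hset, hsame]
        have hiff : (j + i ≤ (k : Int) ∧ i ∣ ((k : Int) - (j + i))) ↔
            (j ≤ (k : Int) ∧ i ∣ ((k : Int) - j)) := by
          constructor
          · rintro ⟨h1, h2⟩
            refine ⟨by omega, ?_⟩
            have he : (k : Int) - j = ((k : Int) - (j + i)) + i := by ring
            rw [he]; exact dvd_add h2 dvd_rfl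
          · rintro ⟨h1, h2⟩
            have hne : (0:Int) < (k : Int) - j := by omega
            have hle : i ≤ (k : Int) - j := Int.le_of_dvd hne h2
            refine ⟨by omega, ?_⟩
            have he : (k : Int) - (j + i) = ((k : Int) - j) - i := by ring
            rw [he]; exact dvd_sub h2 dvd_rfl
        simp only [hiff]
  | case2 j d hj hi => intro h; exact absurd h hi
  | case3 j d hj =>
      intro _ hj0 hm k hk
      have hklt : (k : Int) < m := by omega
      rw [pvALoop]; simp only [hj, if_false]
      have hno : ¬ (j ≤ (k : Int) ∧ i ∣ ((k : Int) - j)) := by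
        rintro ⟨h1, _⟩; omega
      simp [hno]

theorem fold_length (m : Int) (l : List Int) (d0 : List (List Int)) :
    (l.foldl (fun d i => pvALoop m i (2 * i) d) d0).length = d0.length := by
  induction l generalizing d0 with
  | nil => rfl
  | cons a l ih => simp only [List.foldl_cons]; rw [ih, pvALoop_length]

theorem cond_eq (a : Int) (k : Nat) (ha : 0 < a) :
    (decide (0 < a) && (PySem.Int.mod (k : Int) a == 0) && decide (2 ≤ PySem.Int.floordiv (k : Int) a))
      = decide (2 * a ≤ (k : Int) ∧ a ∣ (k : Int)) := by
  rw [Bool.eq_iff_iff]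
  simp only [Bool.and_eq_true, decide_eq_true_eq, beq_iff_eq]
  rw [PySem.Int.mod_eq_zero_iff_dvd, PySem.Int.le_floordiv_iff_mul_le ha]
  constructor
  · rintro ⟨⟨_, h⟩, h2⟩; exact ⟨h2, h⟩
  · rintro ⟨h2, h⟩; exact ⟨⟨ha, h⟩, h2⟩

theorem fold_getD (m : Int) (l : List Int) (d0 : List (List Int)) :
    (∀ i ∈ l, 0 < i) → d0.length = m.toNat → ∀ k : Nat, k < d0.length →
    (l.foldl (fun d i => pvALoop m i (2 * i) d) d0).getD k [] =
      l.foldl (fun s i =>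
          if (decide (0 < i) && (PySem.Int.mod (k : Int) i == 0)
              && decide (2 ≤ PySem.Int.floordiv (k : Int) i)) = true
          then PySem.Set.add s i else s) (d0.getD k []) := by
  induction l generalizing d0 with
  | nil => intro _ _ _ _; rfl
  | cons a l ih =>
      intro hpos hm k hk
      have ha : 0 < a := hpos a (List.mem_cons_self)
      simp only [List.foldl_cons]
      rw [ih (pvALoop m a (2 * a) d0) (fun i hi => hpos i (List.mem_cons_of_mem _ hi))
          (by rw [pvALoop_length]; exact hm) k (by rw [pvALoop_length]; exact hk)]
      congr 1
      rw [pvALoop_getD m a (2 * a) d0 ha (by omega) hm k hk]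
      rw [cond_eq a k ha]
      have hiff : (2 * a ≤ (k : Int) ∧ a ∣ ((k : Int) - 2 * a)) ↔
          (2 * a ≤ (k : Int) ∧ a ∣ (k : Int)) := by
        constructor
        · rintro ⟨h1, h2⟩
          refine ⟨h1, ?_⟩
          have he : (k : Int) = ((k : Int) - 2 * a) + 2 * a := by ring
          rw [he]; exact dvd_add h2 ⟨2, by ring⟩
        · rintro ⟨h1, h2⟩
          exact ⟨h1, dvd_sub h2 ⟨2, by ring⟩⟩
      by_cases hc : 2 * a ≤ (k : Int) ∧ a ∣ (k : Int)
      · rw [if_pos (hiff.mpr hc), if_pos (by simpa using hc)]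
      · rw [if_neg (fun h => hc (hiff.mp h)), if_neg (by simpa using hc)]

theorem fold_if_filter (p : Int → Bool) (l : List Int) (s : PySem.Set Int) :
    l.foldl (fun s i => if p i = true then PySem.Set.add s i else s) s
      = (l.filter p).foldl PySem.Set.add s := by
  induction l generalizing s with
  | nil => rfl
  | cons a l ih =>
      by_cases hp : p a
      · simp only [List.foldl_cons, List.filter_cons, hp, if_true, ih]
      · simp only [List.foldl_cons, List.filter_cons, hp, if_false, ih,
          Bool.false_eq_true]

-- ===== VERDICT (by name: the statement is the Claim_ definition above) =====
theorem divisorsinl_spec : Claim_equal_divisorsinl := by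
  unfold Claim_equal_divisorsinl
  intro m l _ hpre
  unfold Spec_divisorsinl divisorsinl divisorsinl_alt
  have hLlen : (l.foldl (fun d i => pvALoop m i (2 * i) d)
      ((PySem.List.pyRange 0 m 1).map (fun _ => ([] : List Int)))).length
      = (PySem.List.pyRange 0 m 1).length := by
    rw [fold_length, List.length_map]
  apply List.ext_getElem (by rw [hLlen, List.length_map])
  intro k hk1 hk2
  have hkR : k < (PySem.List.pyRange 0 m 1).length := hLlen ▸ hk1
  have hm0 : 0 < m := by
    have h := hkR
    rw [PySem.List.length_pyRange_one] at h
    omega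
  have hd0len : ((PySem.List.pyRange 0 m 1).map (fun _ => ([] : List Int))).length = m.toNat := by
    rw [List.length_map, PySem.List.length_pyRange_one]; omega
  have hkd0 : k < ((PySem.List.pyRange 0 m 1).map (fun _ => ([] : List Int))).length := by
    rw [List.length_map]; exact hkR
  have hpos : ∀ i ∈ l, 0 < i := by
    intro i hi
    rcases hpre i hi with h | h
    · exact h
    · omega
  rw [← List.getD_eq_getElem _ ([] : List Int) hk1]
  rw [fold_getD m l _ hpos hd0len k hkd0]
  have hgetD0 : (((PySem.List.pyRange 0 m 1).map (fun _ => ([] : List Int))).getD k [])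
      = ([] : List Int) := by
    rw [List.getD_eq_getElem _ _ hkd0, List.getElem_map]
  rw [hgetD0, fold_if_filter]
  rw [List.getElem_map]
  have hRk : (PySem.List.pyRange 0 m 1)[k]'(by rw [List.length_map] at hk2; exact hk2)
      = (k : Int) := by
    rw [PySem.List.getElem_pyRange_one]; ring
  rw [hRk, PySem.Set.ofList_eq_foldl]
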